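-- pv_equiv track=rewrite | github.com/doronbruder/Hang-man-game | hangman.py | choose_letter
-- ===== SOURCE A (Python) =====
-- def create_abc_lst():
--     """This function creates abc-list"""
--     abc_list = ['a', 'b', 'c', 'd', 'e', 'f', 'g', 'h', 'i',
--                 'j', 'k', 'l', 'm', 'n', 'o'
--         , 'p', 'q', 'r', 's', 't', 'u',
--                 'v', 'w', 'x', 'y', 'z']
--     return abc_list
--
-- def choose_letter(words, pattern):
--     """This function finds the most common letter in a list of words and make sure its not in the pattern already"""
--
--     max=0
--     abc_list = create_abc_lst() # creates abc list
--     counter_lst=[0]*26 # a list that will count each letter in the words list that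
--
--     # checks which letters are in the words list but not in the pattern and updates the indexes
--     for word in words:
--         for letter in word:
--             for i in range(len(abc_list)):
--                 if letter==abc_list[i] and not letter in pattern:
--                     counter_lst[i]+=1
--
--     # finds the maximal index
--     for j in range(len(counter_lst)):
--         if counter_lst[j]>counter_lst[max]:
--             max=j
--
--     return abc_list[max]
-- ===== SOURCE B (Python) =====
-- def _freq(words, pattern, letter):
--     if letter in pattern:
--         return 0
--     return sum(word.count(letter) for word in words)
--
-- def choose_letter(words, pattern):
--     best = 'a'
--     best_count = _freq(words, pattern, 'a')
--     for letter in "bcdefghijklmnopqrstuvwxyz":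
--         c = _freq(words, pattern, letter)
--         if c > best_count:
--             best, best_count = letter, c
--     return best
-- ===== Notes on version B (the rewrite author's own statement) =====
-- stated objective: simpler
-- what changed: Replaces A's build-26-slot-counter-table-via-triple-nested-loop then scan-for-argmax with a single running-maximum pass over the 26 letters, computing each letter's (pattern-filtered) frequency on demand with str.count.
import Mathlib
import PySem

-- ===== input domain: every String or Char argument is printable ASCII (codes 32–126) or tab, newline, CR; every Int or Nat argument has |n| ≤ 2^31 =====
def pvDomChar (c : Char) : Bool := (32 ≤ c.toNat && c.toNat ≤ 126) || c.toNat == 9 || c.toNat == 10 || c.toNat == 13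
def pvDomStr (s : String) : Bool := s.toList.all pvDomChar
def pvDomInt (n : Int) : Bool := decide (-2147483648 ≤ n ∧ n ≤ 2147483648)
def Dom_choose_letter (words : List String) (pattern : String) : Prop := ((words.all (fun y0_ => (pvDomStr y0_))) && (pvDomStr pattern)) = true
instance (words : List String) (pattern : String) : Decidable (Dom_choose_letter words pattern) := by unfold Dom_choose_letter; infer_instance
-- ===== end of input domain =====

-- B replaces A's counter-table-then-argmax-scan with a single running-maximum pass
-- over the 26 letters, computing each letter's pattern-filtered frequency on demand (objective: simpler).

-- ===== PORT A =====
-- create_abc_lst(); elements are 1-char Python strings, represented as Char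
def create_abc_lst : List Char :=
  ['a','b','c','d','e','f','g','h','i','j','k','l','m','n','o',
   'p','q','r','s','t','u','v','w','x','y','z']

def choose_letter (words : List String) (pattern : String) : String :=
  let abc_list := create_abc_lst
  -- counter_lst = [0]*26; the triple nested loop, step for step
  let counter_lst : List Int :=
    words.foldl (fun cnt word =>
      word.toList.foldl (fun cnt letter =>
        (List.range abc_list.length).foldl (fun cnt i =>
          -- 'letter in pattern' on a 1-char string = char membership (exact)
          if letter == abc_list.getD i ' ' && !(pattern.toList.contains letter)
          then cnt.set i (cnt.getD i 0 + 1) else cnt) cnt) cnt)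
      (List.replicate 26 (0 : Int))
  -- finds the maximal index
  let m :=
    (List.range counter_lst.length).foldl (fun m j =>
      if counter_lst.getD j 0 > counter_lst.getD m 0 then j else m) 0
  String.singleton (abc_list.getD m ' ')

-- ===== PORT B =====
-- _freq: 'letter in pattern' = char membership; word.count(letter) for a 1-char
-- needle = char count (exact)
def pvFreq (words : List String) (pattern : String) (letter : Char) : Int :=
  if pattern.toList.contains letter then 0
  else (words.map (fun word => ((word.toList.count letter : Nat) : Int))).sum

def choose_letter_alt (words : List String) (pattern : String) : String :=
  let best :=
    "bcdefghijklmnopqrstuvwxyz".toList.foldl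
      (fun st letter =>
        let c := pvFreq words pattern letter
        if c > st.2 then (letter, c) else st)
      ('a', pvFreq words pattern 'a')
  String.singleton best.1

-- ===== PRECONDITION & SPEC =====
def Spec_choose_letter (words : List String) (pattern : String) (out : String) : Prop := out = choose_letter_alt words pattern
instance (words : List String) (pattern : String) (out : String) : Decidable (Spec_choose_letter words pattern out) := by unfold Spec_choose_letter; infer_instance

-- ===== CLAIM (what is proved, stated in full; the proofs are below) =====
def Claim_equal_choose_letter : Prop := ∀ (words : List String) (pattern : String), Dom_choose_letter words pattern → Spec_choose_letter words pattern (choose_letter words pattern)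

-- ===== LEMMAS AND PROOFS =====

-- length is preserved by the inner index fold
theorem pv_len_inner (c : Nat → Bool) :
    ∀ (L : List Nat) (cnt : List Int),
      (L.foldl (fun cnt i => if c i then cnt.set i (cnt.getD i 0 + 1) else cnt) cnt).length
        = cnt.length := by
  intro L
  induction L with
  | nil => intro cnt; rfl
  | cons i L ih =>
      intro cnt
      simp only [List.foldl_cons]
      rw [ih]
      split <;> simp

-- result of the inner index fold, pointwise: each index j gains one per index
-- i ∈ L with c i ∧ i = j
theorem pv_fold_inc (c : Nat → Bool) :
    ∀ (L : List Nat) (cnt : List Int) (j : Nat), j < cnt.length →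
      (L.foldl (fun cnt i => if c i then cnt.set i (cnt.getD i 0 + 1) else cnt) cnt).getD j 0
        = cnt.getD j 0 + (L.countP (fun i => c i && i == j) : Int) := by
  intro L
  induction L with
  | nil => intro cnt j hj; simp
  | cons i L ih =>
      intro cnt j hj
      simp only [List.foldl_cons, List.countP_cons]
      by_cases hc : c i
      · simp only [hc, if_true, Bool.true_and]
        have hlen : j < (cnt.set i (cnt.getD i 0 + 1)).length := by simpa using hj
        rw [ih _ j hlen]
        by_cases hij : i = j
        · subst hij
          have : (cnt.set i (cnt.getD i 0 + 1)).getD i 0 = cnt.getD i 0 + 1 := by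
            simp [List.getD, hj]
          rw [this]; simp; ring
        · have : (cnt.set i (cnt.getD i 0 + 1)).getD j 0 = cnt.getD j 0 := by
            simp [List.getD, hij]
          rw [this]; simp [hij]
      · simp only [Bool.not_eq_true] at hc
        simp only [hc, Bool.false_and, if_neg Bool.false_ne_true]
        rw [ih _ j hj]; simp

-- counting over range n: only i = j can match
theorem pv_countP_range (p : Nat → Bool) (j n : Nat) (hj : j < n) :
    (List.range n).countP (fun i => p i && i == j) = if p j then 1 else 0 := by
  have h1 : ∀ L : List Nat, L.countP (fun i => p i && i == j)
      = if p j then L.count j else 0 := by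
    intro L
    induction L with
    | nil => simp
    | cons a L ih =>
        simp only [List.countP_cons, List.count_cons, ih]
        by_cases ha : a = j
        · subst ha; by_cases hp : p a <;> simp [hp]
        · simp [ha]
  rw [h1, List.count_range]
  simp [hj]

-- one character's effect on slot j of the counter table
theorem pv_char_step (pattern : String) (letter : Char) (cnt : List Int)
    (j : Nat) (hlen : cnt.length = 26) (hj : j < 26) (cj : Char)
    (hcj : cj = create_abc_lst.getD j ' ') :
    ((List.range create_abc_lst.length).foldl (fun cnt i =>
        if letter == create_abc_lst.getD i ' ' && !(pattern.toList.contains letter)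
        then cnt.set i (cnt.getD i 0 + 1) else cnt) cnt).getD j 0
      = cnt.getD j 0
        + (if letter == cj && !(pattern.toList.contains cj) then 1 else 0) := by
  rw [pv_fold_inc _ _ _ _ (by omega)]
  have habc : create_abc_lst.length = 26 := by decide
  rw [habc, pv_countP_range _ _ _ hj]
  by_cases h : letter = cj
  · subst h; simp [hcj]
  · have h1 : (letter == create_abc_lst.getD j ' ') = false := by
      rw [hcj] at h; simpa using h
    have h2 : (letter == cj) = false := by simpa using h
    simp only [h1, h2, Bool.false_and]
    simp

-- one word's effect on slot j: adds the (pattern-filtered) count of cj in the word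
theorem pv_word_fold (pattern : String) (j : Nat) (hj : j < 26) (cj : Char)
    (hcj : cj = create_abc_lst.getD j ' ') :
    ∀ (ls : List Char) (cnt : List Int), cnt.length = 26 →
      (ls.foldl (fun cnt letter =>
          (List.range create_abc_lst.length).foldl (fun cnt i =>
            if letter == create_abc_lst.getD i ' ' && !(pattern.toList.contains letter)
            then cnt.set i (cnt.getD i 0 + 1) else cnt) cnt) cnt).getD j 0
        = cnt.getD j 0
          + (if pattern.toList.contains cj then 0 else (ls.count cj : Int)) := by
  intro ls
  induction ls with
  | nil => intro cnt hlen; simp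
  | cons letter ls ih =>
      intro cnt hlen
      simp only [List.foldl_cons]
      have hlen' : ((List.range create_abc_lst.length).foldl (fun cnt i =>
          if letter == create_abc_lst.getD i ' ' && !(pattern.toList.contains letter)
          then cnt.set i (cnt.getD i 0 + 1) else cnt) cnt).length = 26 := by
        rw [pv_len_inner]; exact hlen
      rw [ih _ hlen', pv_char_step pattern letter cnt j hlen hj cj hcj]
      simp only [List.count_cons]
      by_cases hp : cj ∈ pattern.toList <;> by_cases he : letter = cj
      · subst he; simp [hp]
      · simp [he, hp]
      · subst he; simp [hp]; ring
      · simp [he, hp]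

-- per-word length preservation
theorem pv_len_word (pattern : String) (ls : List Char) (cnt : List Int) :
    (ls.foldl (fun cnt letter =>
        (List.range create_abc_lst.length).foldl (fun cnt i =>
          if letter == create_abc_lst.getD i ' ' && !(pattern.toList.contains letter)
          then cnt.set i (cnt.getD i 0 + 1) else cnt) cnt) cnt).length = cnt.length := by
  induction ls generalizing cnt with
  | nil => rfl
  | cons letter ls ih => simp only [List.foldl_cons]; rw [ih, pv_len_inner]

-- the whole table build: slot j holds pvFreq of letter j
theorem pv_words_fold (pattern : String) (j : Nat) (hj : j < 26) (cj : Char)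
    (hcj : cj = create_abc_lst.getD j ' ') :
    ∀ (ws : List String) (cnt : List Int), cnt.length = 26 →
      (ws.foldl (fun cnt word =>
          word.toList.foldl (fun cnt letter =>
            (List.range create_abc_lst.length).foldl (fun cnt i =>
              if letter == create_abc_lst.getD i ' ' && !(pattern.toList.contains letter)
              then cnt.set i (cnt.getD i 0 + 1) else cnt) cnt) cnt) cnt).getD j 0
        = cnt.getD j 0 + pvFreq ws pattern cj := by
  intro ws
  induction ws with
  | nil => intro cnt hlen; simp [pvFreq]
  | cons w ws ih =>
      intro cnt hlen
      simp only [List.foldl_cons]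
      have hlen' : (w.toList.foldl (fun cnt letter =>
          (List.range create_abc_lst.length).foldl (fun cnt i =>
            if letter == create_abc_lst.getD i ' ' && !(pattern.toList.contains letter)
            then cnt.set i (cnt.getD i 0 + 1) else cnt) cnt) cnt).length = 26 := by
        rw [pv_len_word]; exact hlen
      rw [ih _ hlen', pv_word_fold pattern j hj cj hcj _ _ hlen]
      unfold pvFreq
      simp only [List.map_cons, List.sum_cons]
      by_cases hp : cj ∈ pattern.toList
      · simp [hp]
      · simp [hp]; ring

-- the running-maximum pair fold tracks A's argmax index fold
theorem pv_pair_fold (f : Char → Int) (g : Nat → Int) :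
    ∀ (L : List Nat) (m : Nat),
      (∀ j ∈ L, g j = f (create_abc_lst.getD j ' ')) →
      g m = f (create_abc_lst.getD m ' ') →
      (L.map (fun j => create_abc_lst.getD j ' ')).foldl
          (fun st c => if f c > st.2 then (c, f c) else st)
          (create_abc_lst.getD m ' ', g m)
        = (create_abc_lst.getD (L.foldl (fun m j => if g j > g m then j else m) m) ' ',
           g (L.foldl (fun m j => if g j > g m then j else m) m)) := by
  intro L
  induction L with
  | nil => intro m hL hm; rfl
  | cons j L ih =>
      intro m hL hm
      simp only [List.map_cons, List.foldl_cons]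
      have hj : g j = f (create_abc_lst.getD j ' ') := hL j (by simp)
      by_cases hgt : g j > g m
      · have : f (create_abc_lst.getD j ' ') > (create_abc_lst.getD m ' ', g m).2 := by
          show f _ > g m
          rw [← hj]; exact hgt
        rw [if_pos this, if_pos hgt, ← hj]
        exact ih j (fun k hk => hL k (by simp [hk])) hj
      · have : ¬ f (create_abc_lst.getD j ' ') > (create_abc_lst.getD m ' ', g m).2 := by
          show ¬ f _ > g m
          rw [← hj]; exact hgt
        rw [if_neg this, if_neg hgt]
        exact ih m (fun k hk => hL k (by simp [hk])) hm

-- whole-table length preservation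
theorem pv_len_words (pattern : String) (ws : List String) (cnt : List Int) :
    (ws.foldl (fun cnt word =>
        word.toList.foldl (fun cnt letter =>
          (List.range create_abc_lst.length).foldl (fun cnt i =>
            if letter == create_abc_lst.getD i ' ' && !(pattern.toList.contains letter)
            then cnt.set i (cnt.getD i 0 + 1) else cnt) cnt) cnt) cnt).length = cnt.length := by
  induction ws generalizing cnt with
  | nil => rfl
  | cons w ws ih => simp only [List.foldl_cons]; rw [ih, pv_len_word]

theorem choose_letter_spec : Claim_equal_choose_letter := by
  intro words pattern _
  show choose_letter words pattern = choose_letter_alt words pattern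
  unfold choose_letter choose_letter_alt
  dsimp only
  set cnt := words.foldl (fun cnt word =>
      word.toList.foldl (fun cnt letter =>
        (List.range create_abc_lst.length).foldl (fun cnt i =>
          if letter == create_abc_lst.getD i ' ' && !(pattern.toList.contains letter)
          then cnt.set i (cnt.getD i 0 + 1) else cnt) cnt) cnt)
    (List.replicate 26 (0 : Int)) with hcnt
  have hlen : cnt.length = 26 := by rw [hcnt, pv_len_words]; simp
  have hg : ∀ j, j < 26 → cnt.getD j 0 = pvFreq words pattern (create_abc_lst.getD j ' ') := by
    intro j hj
    have hz : (List.replicate 26 (0:Int)).getD j 0 = 0 := by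
      simp only [List.getD, List.getElem?_replicate]
      split <;> rfl
    rw [hcnt, pv_words_fold pattern j hj _ rfl _ _ (by simp), hz, zero_add]
  have hmem : ∀ j ∈ ([1,2,3,4,5,6,7,8,9,10,11,12,13,14,15,16,17,18,19,20,21,22,23,24,25] : List Nat),
      (fun j => cnt.getD j 0) j = pvFreq words pattern (create_abc_lst.getD j ' ') := by
    intro j hj
    exact hg j (by simp at hj; omega)
  have h0 : (fun j => cnt.getD j 0) 0 = pvFreq words pattern (create_abc_lst.getD 0 ' ') :=
    hg 0 (by norm_num)
  have key := pv_pair_fold (pvFreq words pattern) (fun j => cnt.getD j 0)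
    ([1,2,3,4,5,6,7,8,9,10,11,12,13,14,15,16,17,18,19,20,21,22,23,24,25] : List Nat) 0 hmem h0
  rw [hlen]
  rw [show List.range 26 = 0 :: ([1,2,3,4,5,6,7,8,9,10,11,12,13,14,15,16,17,18,19,20,21,22,23,24,25] : List Nat) from rfl]
  rw [List.foldl_cons, if_neg (lt_irrefl _)]
  rw [show "bcdefghijklmnopqrstuvwxyz".toList
      = ([1,2,3,4,5,6,7,8,9,10,11,12,13,14,15,16,17,18,19,20,21,22,23,24,25] : List Nat).map (fun j => create_abc_lst.getD j ' ') from rfl]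
  rw [show ('a', pvFreq words pattern 'a')
      = (create_abc_lst.getD 0 ' ', cnt.getD 0 0) from by rw [show cnt.getD 0 0 = pvFreq words pattern 'a' from hg 0 (by norm_num)]; rfl]
  rw [key]
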